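-- pv_equiv track=rewrite | github.com/alexbarashov/TesterSDR | beacon406/lib/demod.py | halfbits_to_bytes
-- ===== SOURCE A (Python) =====
-- def halfbits_to_bytes(half_bits):
--     """
--     half_bits : список из 0/1. Каждая пара = 1 бит:
--                 [1,0] -> 1
--                 [0,1] -> 0
--     return    : список байтов (int), MSB-first
--     """
--     hb = list(half_bits)  # не мутируем исходные
--
--     # если длина нечётная — отбрасываем последний полубит (как ты и решил)
--     if len(hb) % 2 != 0:
--         hb.pop()
--
--     # пары полубитов -> биты
--     bits_list = []
--     for i in range(0, len(hb), 2):
--         pair = hb[i:i+2]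
--         if pair == [1, 0]:
--             bits_list.append("1")
--         elif pair == [0, 1]:
--             bits_list.append("0")
--         else:
--             raise ValueError(f"Недопустимая пара: {pair}")
--
--     # добивка до кратности 8 НУЛЯМИ В КОНЕЦ (LSB конца байта)
--     bits = "".join(bits_list)
--     pad = (-len(bits)) % 8
--     if pad:
--         bits = bits + "0" * pad   # <-- ключевая правка
--
--     # биты -> байты (MSB-first)
--     out = []
--     for i in range(0, len(bits), 8):
--         out.append(int(bits[i:i+8], 2))
--     return out
-- ===== SOURCE B (Python) =====
-- def halfbits_to_bytes(half_bits):
--     # One pass: decode each half-bit pair and pack bits into bytes with an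
--     # integer accumulator, instead of building an intermediate bit string.
--     hb = list(half_bits)
--     if len(hb) % 2 != 0:
--         hb.pop()
--     out = []
--     cur = 0
--     nbits = 0
--     for i in range(0, len(hb), 2):
--         a, b = hb[i], hb[i + 1]
--         if a == 1 and b == 0:
--             bit = 1
--         elif a == 0 and b == 1:
--             bit = 0
--         else:
--             raise ValueError(f"Недопустимая пара: {[a, b]}")
--         cur = (cur << 1) | bit
--         nbits += 1
--         if nbits == 8:
--             out.append(cur)
--             cur = 0
--             nbits = 0
--     if nbits:
--         out.append(cur << (8 - nbits))
--     return out
-- ===== Notes on version B (the rewrite author's own statement) =====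
-- stated objective: simpler
-- what changed: Replaces A's two loops and intermediate bit string (decode pairs to '0'/'1' chars, join, pad, then parse 8-char slices with int(.,2)) by a single pass over the pairs that packs bits into bytes with an integer accumulator, emitting a left-shifted final partial byte.
import Mathlib
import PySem

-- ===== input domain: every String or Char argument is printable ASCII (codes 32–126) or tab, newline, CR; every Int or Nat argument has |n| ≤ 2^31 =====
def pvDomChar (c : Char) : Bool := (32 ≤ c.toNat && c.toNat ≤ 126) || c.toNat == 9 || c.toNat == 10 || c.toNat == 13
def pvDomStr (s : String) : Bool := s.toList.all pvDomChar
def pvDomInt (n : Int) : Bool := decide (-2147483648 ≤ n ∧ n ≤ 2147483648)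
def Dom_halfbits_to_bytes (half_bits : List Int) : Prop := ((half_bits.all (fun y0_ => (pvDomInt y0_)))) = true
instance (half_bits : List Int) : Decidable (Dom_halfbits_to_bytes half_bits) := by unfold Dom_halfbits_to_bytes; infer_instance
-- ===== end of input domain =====

-- B packs the decoded bits into bytes in one pass with an integer accumulator,
-- instead of A's two loops through an intermediate bit string (objective: simpler).

-- ===== PORT A =====
-- 'for i in range(0, len(hb), 2): pair = hb[i:i+2]' as the structural recursion over
-- consecutive pairs (same pairs, same appended '1'/'0' characters); the ValueError
-- branch appends nothing (unreachable under Pre_).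
def pyBitsA : List Int → List Char
  | a :: b :: rest =>
      if a = 1 ∧ b = 0 then '1' :: pyBitsA rest
      else if a = 0 ∧ b = 1 then '0' :: pyBitsA rest
      else pyBitsA rest
  | _ => []

-- int(s, 2) on a string of '0'/'1' characters
def int2 (s : List Char) : Int := s.foldl (fun acc c => 2 * acc + (if c = '1' then 1 else 0)) 0

-- 'for i in range(0, len(bits), 8): out.append(int(bits[i:i+8], 2))' as recursion
-- taking 8 characters at a time.
def bytesA (s : List Char) : List Int :=
  if h : s = [] then [] else int2 (s.take 8) :: bytesA (s.drop 8)
termination_by s.length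
decreasing_by simp [List.length_drop]; exact List.length_pos_iff.mpr h

def halfbits_to_bytes (half_bits : List Int) : List Int :=
  let hb := if half_bits.length % 2 ≠ 0 then half_bits.dropLast else half_bits
  let bits_list := pyBitsA hb
  let pad := PySem.Int.mod (-(bits_list.length : Int)) 8
  let bits := if pad ≠ 0 then bits_list ++ List.replicate pad.toNat '0' else bits_list
  bytesA bits

-- ===== PORT B =====
-- the while loop over even i, with state (out, cur, nbits); the invalid-pair
-- ValueError path (unreachable under Pre_) contributes bit 0.
-- '(cur << 1) | bit' = 'cur * 2 + bit' and 'cur << (8 - nbits)' = 'cur * 2 ^ (8 - nbits)'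
-- exactly, since here cur ≥ 0 and bit ∈ {0, 1}.
def altGo : List Int → List Int → Int → Int → List Int
  | a :: b :: rest, out, cur, nbits =>
      let bit : Int := if a = 1 ∧ b = 0 then 1 else 0
      let cur' := cur * 2 + bit
      let nbits' := nbits + 1
      if nbits' = 8 then altGo rest (out ++ [cur']) 0 0
      else altGo rest out cur' nbits'
  | _, out, cur, nbits =>
      if nbits ≠ 0 then out ++ [cur * 2 ^ (8 - nbits).toNat] else out

def halfbits_to_bytes_alt (half_bits : List Int) : List Int :=
  altGo half_bits [] 0 0

-- ===== PRECONDITION & SPEC =====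
-- every consecutive half-bit pair (a possible odd trailing half-bit is dropped) is
-- [1,0] or [0,1]; on any other pair the Python A (and B) raises ValueError.
def validPairs : List Int → Bool
  | a :: b :: rest => ((a = 1 && b = 0) || (a = 0 && b = 1)) && validPairs rest
  | _ => true

def Pre_halfbits_to_bytes (half_bits : List Int) : Prop := validPairs half_bits = true
instance (half_bits : List Int) : Decidable (Pre_halfbits_to_bytes half_bits) := by unfold Pre_halfbits_to_bytes; infer_instance
def pvWitness_halfbits_to_bytes : List Int := [1, 0, 0, 1, 1, 0, 1, 0, 0, 1, 1]

def Spec_halfbits_to_bytes (half_bits : List Int) (out : List Int) : Prop := out = halfbits_to_bytes_alt half_bits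
instance (half_bits : List Int) (out : List Int) : Decidable (Spec_halfbits_to_bytes half_bits out) := by unfold Spec_halfbits_to_bytes; infer_instance

-- ===== CLAIM (what is proved, stated in full; the proofs are below) =====
def Claim_equal_halfbits_to_bytes : Prop := ∀ (half_bits : List Int), Dom_halfbits_to_bytes half_bits → Pre_halfbits_to_bytes half_bits → Spec_halfbits_to_bytes half_bits (halfbits_to_bytes half_bits)

-- ===== LEMMAS AND PROOFS =====

-- recursor matching the two-at-a-time shape of pyBitsA/altGo/validPairs
theorem pairRec {P : List Int → Prop} (h0 : P []) (h1 : ∀ a, P [a])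
    (h2 : ∀ a b rest, P rest → P (a :: b :: rest)) : ∀ l, P l
  | [] => h0
  | [a] => h1 a
  | a :: b :: rest => h2 a b rest (pairRec h0 h1 h2 rest)

-- the tail of A's pipeline, as a function of the decoded bit string
def refBytes (s : List Char) : List Int :=
  let pad := PySem.Int.mod (-(s.length : Int)) 8
  bytesA (if pad ≠ 0 then s ++ List.replicate pad.toNat '0' else s)

theorem int2_append_zeros (s : List Char) (k : Nat) :
    int2 (s ++ List.replicate k '0') = int2 s * 2 ^ k := by
  induction k with
  | zero => simp [int2]
  | succ k ih =>
      rw [List.replicate_succ' (n := k), ← List.append_assoc]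
      simp [int2, List.foldl_append] at ih ⊢
      rw [ih]; ring

theorem int2_snoc (s : List Char) (c : Char) :
    int2 (s ++ [c]) = 2 * int2 s + (if c = '1' then 1 else 0) := by
  simp [int2, List.foldl_append]

theorem bytesA_ne_nil (s : List Char) (h : s ≠ []) :
    bytesA s = int2 (s.take 8) :: bytesA (s.drop 8) := by
  rw [bytesA]; simp [h]

theorem pmod8 (a : Int) : PySem.Int.mod a 8 = a % 8 :=
  PySem.Int.mod_eq_emod_of_pos (by norm_num)

theorem bytesA_chunk (t u : List Char) (ht : t.length = 8) :
    bytesA (t ++ u) = int2 t :: bytesA u := by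
  rw [bytesA_ne_nil _ (by intro hnil; apply_fun List.length at hnil; simp [ht] at hnil)]
  rw [List.take_append_of_le_length (by omega), List.drop_append_of_le_length (by omega)]
  rw [List.take_of_length_le (by omega), List.drop_eq_nil_of_le (by omega)]
  simp

theorem refBytes_nil : refBytes [] = [] := by
  simp only [refBytes, pmod8]
  norm_num
  rw [bytesA]
  simp

theorem refBytes_short (s : List Char) (h0 : s ≠ []) (h8 : s.length < 8) :
    refBytes s = [int2 s * 2 ^ (8 - s.length)] := by
  have hlen : 1 ≤ s.length := List.length_pos_iff.mpr h0
  have hpad : PySem.Int.mod (-(s.length : Int)) 8 = ((8 - s.length : Nat) : Int) := by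
    rw [pmod8]; omega
  have hne : ((8 - s.length : Nat) : Int) ≠ 0 := Int.natCast_ne_zero.mpr (by omega)
  simp only [refBytes]
  rw [hpad, if_pos hne, Int.toNat_natCast]
  rw [bytesA_ne_nil _ (by simp [h0])]
  rw [List.take_of_length_le (by simp; omega), List.drop_eq_nil_of_le (by simp; omega)]
  rw [int2_append_zeros]
  rw [bytesA]
  simp

theorem refBytes_chunk (t s : List Char) (ht : t.length = 8) :
    refBytes (t ++ s) = int2 t :: refBytes s := by
  have hpad : PySem.Int.mod (-(((t ++ s).length : Nat) : Int)) 8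
      = PySem.Int.mod (-(s.length : Int)) 8 := by
    rw [pmod8, pmod8]; simp only [List.length_append, ht]; omega
  simp only [refBytes]
  rw [hpad]
  by_cases h : PySem.Int.mod (-(s.length : Int)) 8 ≠ 0
  · rw [if_pos h, if_pos h, List.append_assoc, bytesA_chunk t _ ht]
  · rw [if_neg h, if_neg h, bytesA_chunk t _ ht]

theorem pyBitsA_dropLast (l : List Int) (h : l.length % 2 = 1) :
    pyBitsA l.dropLast = pyBitsA l := by
  induction l using pairRec with
  | h0 => simp at h
  | h1 a => simp [pyBitsA]
  | h2 a b rest ih =>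
      have hr : rest ≠ [] := by rintro rfl; simp at h
      have : (a :: b :: rest).dropLast = a :: b :: rest.dropLast := by
        cases rest with
        | nil => exact absurd rfl hr
        | cons c cs => simp [List.dropLast]
      rw [this]
      have hrl : rest.length % 2 = 1 := by simp at h; omega
      simp only [pyBitsA, ih hrl]

theorem altGo_close (rest out : List Int) (c : List Char) (hc7 : c.length = 7)
    (ch : Char) (v : Int) (hchv : (if ch = '1' then (1 : Int) else 0) = v)
    (ih : ∀ (out : List Int) (c : List Char), c.length < 8 →
        altGo rest out (int2 c) (c.length : Int) = out ++ refBytes (c ++ pyBitsA rest)) :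
    altGo rest (out ++ [int2 c * 2 + v]) 0 0 = out ++ refBytes (c ++ ch :: pyBitsA rest) := by
  have h1 := ih (out ++ [int2 c * 2 + v]) [] (by norm_num)
  rw [show int2 [] = 0 from rfl] at h1
  simp only [List.length_nil, Nat.cast_zero, List.nil_append] at h1
  rw [h1]
  rw [show (c ++ ch :: pyBitsA rest) = (c ++ [ch]) ++ pyBitsA rest by simp]
  rw [refBytes_chunk _ _ (by simp [hc7]), int2_snoc, hchv]
  rw [show int2 c * 2 + v = 2 * int2 c + v by ring]
  simp

theorem altGo_more (rest out : List Int) (c : List Char) (hc : c.length + 1 < 8)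
    (ch : Char) (v : Int) (hchv : (if ch = '1' then (1 : Int) else 0) = v)
    (ih : ∀ (out : List Int) (c : List Char), c.length < 8 →
        altGo rest out (int2 c) (c.length : Int) = out ++ refBytes (c ++ pyBitsA rest)) :
    altGo rest out (int2 c * 2 + v) ((c.length : Int) + 1)
      = out ++ refBytes (c ++ ch :: pyBitsA rest) := by
  have h1 := ih out (c ++ [ch]) (by simp; omega)
  rw [int2_snoc, hchv] at h1
  simp only [List.length_append, List.length_cons, List.length_nil] at h1
  push_cast at h1
  rw [show int2 c * 2 + v = 2 * int2 c + v by ring]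
  rw [List.append_assoc] at h1
  simpa using h1

theorem altGo_ref (l : List Int) : validPairs l = true →
    ∀ (out : List Int) (c : List Char), c.length < 8 →
      altGo l out (int2 c) (c.length : Int) = out ++ refBytes (c ++ pyBitsA l) := by
  induction l using pairRec with
  | h0 =>
      intro _ out c hc
      simp only [altGo, pyBitsA, List.append_nil]
      by_cases h : c = []
      · subst h; simp [refBytes_nil]
      · have h0 : ((c.length : Int)) ≠ 0 := by
          have := List.length_pos_iff.mpr h; omega
        rw [refBytes_short c h hc]
        simp only [h0, ne_eq, not_false_eq_true, if_pos]
        have he : ((8 : Int) - (c.length : Int)).toNat = 8 - c.length := by omega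
        rw [he]
  | h1 a =>
      intro _ out c hc
      simp only [altGo, pyBitsA, List.append_nil]
      by_cases h : c = []
      · subst h; simp [refBytes_nil]
      · have h0 : ((c.length : Int)) ≠ 0 := by
          have := List.length_pos_iff.mpr h; omega
        rw [refBytes_short c h hc]
        simp only [h0, ne_eq, not_false_eq_true, if_pos]
        have he : ((8 : Int) - (c.length : Int)).toNat = 8 - c.length := by omega
        rw [he]
  | h2 a b rest ih =>
      intro hv out c hc
      have hv' : validPairs rest = true := by
        simp [validPairs] at hv; exact hv.2
      have IH := ih hv'
      have hpair : (a = 1 ∧ b = 0) ∨ (a = 0 ∧ b = 1) := by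
        simp [validPairs] at hv
        rcases hv.1 with h | h <;> [left; right] <;> exact h
      rcases hpair with ⟨ha, hb⟩ | ⟨ha, hb⟩ <;> subst ha <;> subst hb <;>
        simp only [altGo, pyBitsA] <;> norm_num <;> split
      · next h8 => exact altGo_close rest out c (by omega) '1' 1 (by norm_num) IH
      · next h8 => exact altGo_more rest out c (by omega) '1' 1 (by norm_num) IH
      · next h8 =>
          rw [show int2 c * 2 = int2 c * 2 + (0 : Int) by ring]
          exact altGo_close rest out c (by omega) '0' 0 (by decide) IH
      · next h8 =>
          rw [show int2 c * 2 = int2 c * 2 + (0 : Int) by ring]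
          exact altGo_more rest out c (by omega) '0' 0 (by decide) IH

-- ===== VERDICT (by name: the statement is the Claim_ definition above) =====
theorem halfbits_to_bytes_spec : Claim_equal_halfbits_to_bytes := by
  intro half_bits _ hpre
  unfold Spec_halfbits_to_bytes halfbits_to_bytes halfbits_to_bytes_alt
  have hmain := altGo_ref half_bits hpre [] [] (by norm_num)
  simp only [int2, List.foldl_nil, List.length_nil, Nat.cast_zero, List.nil_append] at hmain
  rw [hmain]
  have hbits : pyBitsA (if half_bits.length % 2 ≠ 0 then half_bits.dropLast else half_bits)
      = pyBitsA half_bits := by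
    by_cases h : half_bits.length % 2 ≠ 0
    · rw [if_pos h]; exact pyBitsA_dropLast _ (by omega)
    · rw [if_neg h]
  simp only [hbits]
  rfl
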